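-- pv_equiv track=rewrite | github.com/postsent/unsw_course_filter | src/tmp.py | sort_by_key
-- ===== SOURCE A (Python) =====
-- def str_sum(a, b):
--         c_enrol = int(a[:a.index("/")])
--         c_total = int(a[a.index("/") + 1:])
--         prev_enrol = int(b[:b.index("/")])
--         prev_total = int(b[b.index("/") + 1:])
--         enrol = c_enrol  + prev_enrol
--         total = prev_total + c_total
--         return str(enrol) + "/" + str(total)
--
-- def sort_by_key(l):
--     tmp = sorted(l, key=lambda k: k["c"])
--     res = []
--     res.append(tmp[0])
--     for t in tmp[1:]:
--         if t["c"]  == res[-1]["c"]: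
--             res[-1]["e"] = str_sum(res[-1]["e"], t["e"])
--             res[-1]["l"] = str_sum(res[-1]["l"], t["l"])
--             continue
--         res.append(t)
--     return res
-- ===== SOURCE B (Python) =====
-- def _frac_add(a, b):
--     an, _, ad = a.partition("/")
--     bn, _, bd = b.partition("/")
--     return str(int(an) + int(bn)) + "/" + str(int(ad) + int(bd))
--
-- def sort_by_key(l):
--     # bucket the records by their "c" key (no sort of the records themselves)
--     groups = {}
--     for t in l:
--         groups.setdefault(t["c"], []).append(t)
--     # only the distinct keys are sorted; reduce each bucket into its first record
--     res = []
--     for c in sorted(groups):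
--         head, *rest = groups[c]
--         for t in rest:
--             head["e"] = _frac_add(head["e"], t["e"])
--             head["l"] = _frac_add(head["l"], t["l"])
--         res.append(head)
--     return res
-- ===== Notes on version B (the rewrite author's own statement) =====
-- stated objective: alternative
-- what changed: A sorts all records and merges adjacent equal-key records into res[-1] in one pass; B never sorts the records: it buckets them into a dict of lists keyed by c in one pass, sorts only the distinct keys, and reduces each bucket into its first record.
import Mathlib
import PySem

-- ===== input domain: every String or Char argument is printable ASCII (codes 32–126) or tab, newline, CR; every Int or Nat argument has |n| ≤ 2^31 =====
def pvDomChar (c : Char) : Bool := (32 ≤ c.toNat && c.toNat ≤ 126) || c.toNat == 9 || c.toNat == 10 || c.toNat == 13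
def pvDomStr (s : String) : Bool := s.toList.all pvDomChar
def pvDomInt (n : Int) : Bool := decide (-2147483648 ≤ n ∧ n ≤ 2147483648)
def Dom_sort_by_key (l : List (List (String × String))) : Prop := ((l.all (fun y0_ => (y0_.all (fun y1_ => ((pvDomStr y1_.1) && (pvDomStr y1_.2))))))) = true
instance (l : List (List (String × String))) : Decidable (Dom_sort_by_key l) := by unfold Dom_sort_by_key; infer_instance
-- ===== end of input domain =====

-- B buckets the records into a dict of lists in one pass (no sort of the records), sorts only the
-- distinct keys, and reduces each bucket into its first record; both Pythons mutate the first dict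
-- of each group in place — the equivalence proved here is about the return value.

-- shared tiny helper: k["c"] — dict lookup is first match in the association-list convention;
-- total form via getD "" (Pre_ guarantees the key is present)
def keyC (d : List (String × String)) : String := (List.lookup "c" d).getD ""

-- d[k] = v on a dict: overwrite in place if the key is present, else append
def setK (d : List (String × String)) (k v : String) : List (String × String) :=
  if d.any (fun p => p.1 == k) then d.map (fun p => if p.1 == k then (k, v) else p)
  else d ++ [(k, v)]

-- ===== PORT A =====
-- str_sum: a.index("/") is the first occurrence of the single character '/' = idxOf (Pre_ guarantees
-- it is present; Python raises ValueError otherwise); int(...) = ofChars?, total via getD 0 (Pre_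
-- guarantees it parses); str(n) + "/" + str(n) built on the char-list side (kernel-transparent)
def strSum (a b : String) : String :=
  let ca := a.toList
  let cb := b.toList
  let c_enrol := (PySem.Int.ofChars? (ca.take (ca.idxOf '/'))).getD 0
  let c_total := (PySem.Int.ofChars? (ca.drop (ca.idxOf '/' + 1))).getD 0
  let prev_enrol := (PySem.Int.ofChars? (cb.take (cb.idxOf '/'))).getD 0
  let prev_total := (PySem.Int.ofChars? (cb.drop (cb.idxOf '/' + 1))).getD 0
  String.ofList (PySem.Int.toChars (c_enrol + prev_enrol) ++ '/' :: PySem.Int.toChars (prev_total + c_total))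

-- the merge A performs on res[-1]: res[-1]["e"] = str_sum(...), then res[-1]["l"] = str_sum(...)
def mergeA (last t : List (String × String)) : List (String × String) :=
  let last₁ := setK last "e" (strSum ((List.lookup "e" last).getD "") ((List.lookup "e" t).getD ""))
  setK last₁ "l" (strSum ((List.lookup "l" last₁).getD "") ((List.lookup "l" t).getD ""))

-- loop body of A; res[-1] = PySem.List.pyGetD res (-1) [], and the in-place mutation of res[-1]
-- becomes dropLast ++ [updated last] (res is nonempty throughout; Pre_ excludes the empty input)
def stepA (res : List (List (String × String))) (t : List (String × String)) :
    List (List (String × String)) :=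
  let last := PySem.List.pyGetD res (-1) []
  if keyC t == keyC last then res.dropLast ++ [mergeA last t]
  else res ++ [t]

def sort_by_key (l : List (List (String × String))) : List (List (String × String)) :=
  match PySem.List.sorted l keyC false with
  | [] => []  -- tmp[0] raises IndexError here; excluded by Pre_
  | h :: rest => rest.foldl stepA [h]

-- ===== PORT B =====
-- s.partition('/') for a single-character separator: (part before first '/', part after);
-- the middle component is unused by B, so it is not materialised
def pyPartitionSlash (cs : List Char) : List Char × List Char :=
  if '/' ∈ cs then (cs.take (cs.idxOf '/'), cs.drop (cs.idxOf '/' + 1)) else (cs, [])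

def fracAdd (a b : String) : String :=
  let pa := pyPartitionSlash a.toList
  let pb := pyPartitionSlash b.toList
  let an := (PySem.Int.ofChars? pa.1).getD 0
  let ad := (PySem.Int.ofChars? pa.2).getD 0
  let bn := (PySem.Int.ofChars? pb.1).getD 0
  let bd := (PySem.Int.ofChars? pb.2).getD 0
  String.ofList (PySem.Int.toChars (an + bn) ++ '/' :: PySem.Int.toChars (ad + bd))

-- the body of B's inner loop: head["e"] = _frac_add(...), then head["l"] = _frac_add(...)
def mergeB (head t : List (String × String)) : List (String × String) :=
  let head₁ := setK head "e" (fracAdd ((List.lookup "e" head).getD "") ((List.lookup "e" t).getD ""))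
  setK head₁ "l" (fracAdd ((List.lookup "l" head₁).getD "") ((List.lookup "l" t).getD ""))

-- groups.setdefault(t["c"], []).append(t) = modify with default []; 'for c in sorted(groups)'
-- sorts the keys; 'head, *rest = groups[c]' never sees [] (every sorted key is a key of groups)
def buildGroups (l : List (List (String × String))) :
    PySem.Dict String (List (List (String × String))) :=
  l.foldl (fun g t => g.modify (keyC t) [] (fun v => v ++ [t])) PySem.Dict.empty

def sort_by_key_alt (l : List (List (String × String))) : List (List (String × String)) :=
  let groups := buildGroups l
  (PySem.List.sorted groups.keys (fun x => x) false).foldl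
    (fun res c =>
      match groups.getD c [] with
      | [] => res
      | h :: rest => res ++ [rest.foldl mergeB h]) []

-- ===== PRECONDITION & SPEC =====
-- a[:a.index("/")] and a[a.index("/")+1:] both parse as Python ints (in particular "/" occurs)
def fracOk (o : Option String) : Bool :=
  match o with
  | none => false
  | some s =>
    let cs := s.toList
    cs.contains '/' && (PySem.Int.ofChars? (cs.take (cs.idxOf '/'))).isSome
      && (PySem.Int.ofChars? (cs.drop (cs.idxOf '/' + 1))).isSome

-- Pre_ = exactly where the Python A returns: a nonempty list, every dict has key "c", and every
-- member of a c-group of size ≥ 2 (only those are merged) has "e" and "l" of the parseable form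
-- "int/int".  The Nodup-keys conjunct only pins the association-list ENCODING of a dict (a Python
-- dict never has duplicate keys), so it excludes no Python input A returns on.
def Pre_sort_by_key (l : List (List (String × String))) : Prop :=
  l ≠ [] ∧
  (∀ d ∈ l, (d.map Prod.fst).Nodup ∧ (List.lookup "c" d).isSome) ∧
  (∀ d ∈ l, 1 < l.countP (fun d' => keyC d' == keyC d) →
    fracOk (List.lookup "e" d) ∧ fracOk (List.lookup "l" d))

instance (l : List (List (String × String))) : Decidable (Pre_sort_by_key l) := by
  unfold Pre_sort_by_key; infer_instance

def pvWitness_sort_by_key : (List (List (String × String))) :=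
  [[("c", "x"), ("e", "1/2"), ("l", "3/4")],
   [("c", "x"), ("e", "10/20"), ("l", "30/40")],
   [("c", "a"), ("e", "?"), ("l", "")]]

def Spec_sort_by_key (l : List (List (String × String))) (out : List (List (String × String))) : Prop := out = sort_by_key_alt l
instance (l : List (List (String × String))) (out : List (List (String × String))) : Decidable (Spec_sort_by_key l out) := by unfold Spec_sort_by_key; infer_instance

-- ===== CLAIM (what is proved, stated in full; the proofs are below) =====
def Claim_equal_sort_by_key : Prop := ∀ (l : List (List (String × String))), Dom_sort_by_key l → Pre_sort_by_key l → Spec_sort_by_key l (sort_by_key l)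

-- ===== LEMMAS AND PROOFS =====

-- merging a group: fold A's merge over the tail of the group, starting from its first member
def mergeGroup (xs : List (List (String × String))) : List (String × String) :=
  match xs with
  | [] => []
  | h :: t => t.foldl mergeA h

-- what A's loop computes on the suffix still to be processed, given the current last element
def mergeRuns (cur : List (String × String)) (rest : List (List (String × String))) :
    List (List (String × String)) :=
  match rest with
  | [] => [cur]
  | t :: ts => if keyC t == keyC cur then mergeRuns (mergeA cur t) ts else cur :: mergeRuns t ts

-- str.partition('/') computes the same two slices as index-based slicing (when '/' is absent,
-- idxOf degenerates to length and the slices are (whole, []) as well)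
lemma idxOf_len (cs : List Char) (h : '/' ∉ cs) : cs.idxOf '/' = cs.length := by
  revert h
  induction cs with
  | nil => intro _; rfl
  | cons c cs ih =>
    intro h
    simp only [List.mem_cons, not_or] at h
    have hc : (c == '/') = false := beq_eq_false_iff_ne.mpr (fun hh => h.1 hh.symm)
    simp [List.idxOf_cons, hc, ih h.2]

lemma part_eq (cs : List Char) :
    pyPartitionSlash cs = (cs.take (cs.idxOf '/'), cs.drop (cs.idxOf '/' + 1)) := by
  unfold pyPartitionSlash
  split
  · rfl
  · rename_i h
    have hlen : cs.idxOf '/' = cs.length := idxOf_len cs h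
    rw [hlen]
    simp [List.drop_eq_nil_of_le]

-- the two fraction-adders are extensionally equal (integer addition commutes)
lemma fracAdd_eq_strSum (a b : String) : fracAdd a b = strSum a b := by
  simp only [fracAdd, strSum, part_eq]
  rw [Int.add_comm ((PySem.Int.ofChars? (a.toList.drop (a.toList.idxOf '/' + 1))).getD 0)]

lemma mergeB_eq_mergeA : mergeB = mergeA := by
  funext h t
  simp only [mergeB, mergeA, fracAdd_eq_strSum]

lemma lookup_map_replace (d : List (String × String)) (k v k' : String) (h : (k' == k) = false) :
    List.lookup k' (d.map (fun p => if p.1 == k then (k, v) else p)) = List.lookup k' d := by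
  induction d with
  | nil => rfl
  | cons p d ih =>
    by_cases hp : p.1 == k
    · have hk : p.1 = k := by simpa using hp
      have h2 : (k' == p.1) = false := by rw [hk]; exact h
      simp [List.lookup, hk, h]
      simpa using ih
    · have hk : p.1 ≠ k := by simpa using hp
      by_cases hq : k' == p.1
      · simp [List.lookup, hk, hq]
      · simp only [List.map_cons, List.lookup, hq]
        have hk' : (if p.1 == k then (k, v) else p) = p := by simp [hk]
        rw [hk']
        simp only [hq]
        exact ih

lemma lookup_append_single (d : List (String × String)) (k v k' : String) (h : (k' == k) = false) :
    List.lookup k' (d ++ [(k, v)]) = List.lookup k' d := by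
  induction d with
  | nil => simp [List.lookup, h]
  | cons p d ih =>
    by_cases hp : k' == p.1 <;> simp [List.lookup, hp, ih]

lemma lookup_setK_of_ne (d : List (String × String)) (k v k' : String) (h : (k' == k) = false) :
    List.lookup k' (setK d k v) = List.lookup k' d := by
  unfold setK
  split
  · exact lookup_map_replace d k v k' h
  · exact lookup_append_single d k v k' h

lemma keyC_setK (d : List (String × String)) (k v : String) (h : ("c" == k) = false) :
    keyC (setK d k v) = keyC d := by
  simp [keyC, lookup_setK_of_ne d k v "c" h]

lemma keyC_mergeA (last t : List (String × String)) : keyC (mergeA last t) = keyC last := by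
  unfold mergeA
  rw [keyC_setK _ _ _ (by decide), keyC_setK _ _ _ (by decide)]

lemma keyC_foldl_mergeA (ts : List (List (String × String))) (h : List (String × String)) :
    keyC (ts.foldl mergeA h) = keyC h := by
  induction ts generalizing h with
  | nil => rfl
  | cons t ts ih => rw [List.foldl_cons, ih, keyC_mergeA]

-- A's loop in closed form: res = done ++ [cur] evolves to done ++ mergeRuns cur rest
lemma foldl_stepA_eq (rest : List (List (String × String))) :
    ∀ (done : List (List (String × String))) (cur : List (String × String)),
      rest.foldl stepA (done ++ [cur]) = done ++ mergeRuns cur rest := by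
  induction rest with
  | nil => intro done cur; simp [mergeRuns]
  | cons t ts ih =>
    intro done cur
    rw [List.foldl_cons]
    have hstep : stepA (done ++ [cur]) t =
        if keyC t == keyC cur then done ++ [mergeA cur t] else (done ++ [cur]) ++ [t] := by
      simp [stepA, PySem.List.pyGetD_neg_one_append_singleton]
    by_cases hc : keyC t == keyC cur
    · rw [hstep, if_pos hc, ih done (mergeA cur t)]
      simp [mergeRuns, hc]
    · rw [hstep, if_neg hc, ih (done ++ [cur]) t]
      simp only [mergeRuns, hc, if_neg]
      simp [mergeRuns, hc, List.append_assoc]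

-- consuming one run: while the next elements share cur's key, A folds them into cur
lemma mergeRuns_run (same : List (List (String × String))) :
    ∀ (cur : List (String × String)) (diff : List (List (String × String))),
      (∀ t ∈ same, keyC t = keyC cur) →
      mergeRuns cur (same ++ diff) = mergeRuns (same.foldl mergeA cur) diff := by
  induction same with
  | nil => intro cur diff _; rfl
  | cons s ss ih =>
    intro cur diff hall
    have hs : keyC s = keyC cur := hall s (by simp)
    simp only [List.cons_append, mergeRuns, hs, beq_self_eq_true, if_pos]
    have hss : ∀ t ∈ ss, keyC t = keyC (mergeA cur s) := by
      intro t ht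
      rw [keyC_mergeA]
      exact hall t (by simp [ht])
    rw [ih (mergeA cur s) diff hss, List.foldl_cons]

-- PySem.Set internals: folding add from a seed appends a sublist of the input
lemma foldl_add_sublist {α : Type} [BEq α] (xs : List α) :
    ∀ s : List α, ∃ t : List α, xs.foldl PySem.Set.add s = s ++ t ∧ t.Sublist xs := by
  induction xs with
  | nil => intro s; exact ⟨[], by simp⟩
  | cons x xs ih =>
    intro s
    rw [List.foldl_cons]
    unfold PySem.Set.add
    split
    · obtain ⟨t, h1, h2⟩ := ih s
      exact ⟨t, h1, h2.cons x⟩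
    · obtain ⟨t, h1, h2⟩ := ih (s ++ [x])
      exact ⟨x :: t, by simpa using h1, h2.cons₂ x⟩

lemma ofList_sublist {α : Type} [BEq α] (xs : List α) : (PySem.Set.ofList xs).Sublist xs := by
  obtain ⟨t, h1, h2⟩ := foldl_add_sublist xs PySem.Set.empty
  have : PySem.Set.ofList xs = t := by
    simpa [PySem.Set.ofList, PySem.Set.empty] using h1
  rw [this]; exact h2

lemma ofList_pairwise_lt (ks : List String) (h : ks.Pairwise (· ≤ ·)) :
    (PySem.Set.ofList ks).Pairwise (· < ·) := by
  have hle : (PySem.Set.ofList ks).Pairwise (· ≤ ·) := h.sublist (ofList_sublist ks)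
  have hne : (PySem.Set.ofList ks).Pairwise (· ≠ ·) := PySem.Set.nodup_ofList ks
  exact (hle.and hne).imp (fun ⟨hab, hne⟩ => lt_of_le_of_ne hab hne)

-- seed element not in the remaining input commutes out of the fold
lemma foldl_add_cons_seed {α : Type} [BEq α] [LawfulBEq α] (ms : List α) :
    ∀ (c : α) (s : List α), c ∉ ms →
      ms.foldl PySem.Set.add (c :: s) = c :: ms.foldl PySem.Set.add s := by
  induction ms with
  | nil => intro c s _; rfl
  | cons m ms ih =>
    intro c s hnm
    simp only [List.mem_cons, not_or] at hnm
    have hmc : (m == c) = false := beq_eq_false_iff_ne.mpr (fun hh => hnm.1 hh.symm)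
    rw [List.foldl_cons, List.foldl_cons]
    have : PySem.Set.add (c :: s) m = c :: PySem.Set.add s m := by
      simp only [PySem.Set.add, PySem.Set.contains, List.elem_cons, hmc, Bool.false_or]
      split <;> simp
    rw [this, ih c _ hnm.2]

-- ofList of (c :: run of c's ++ ms) with c ∉ ms is c :: ofList ms
lemma ofList_run (ks ms : List String) (c : String)
    (h1 : ∀ k ∈ ks, k = c) (h2 : c ∉ ms) :
    PySem.Set.ofList (c :: (ks ++ ms)) = c :: PySem.Set.ofList ms := by
  have hks : ∀ (s : List String), c ∈ s → ks.foldl PySem.Set.add s = s := by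
    intro s hcs
    induction ks with
    | nil => rfl
    | cons k ks ih =>
      have hk : k = c := h1 k (by simp)
      rw [List.foldl_cons]
      have : PySem.Set.add s k = s := by
        subst hk
        simp [PySem.Set.add, PySem.Set.contains, hcs]
      rw [this]
      exact ih (fun k hk => h1 k (by simp [hk])) 
  simp only [PySem.Set.ofList, List.cons_append, List.foldl_cons, List.foldl_append]
  have hadd : PySem.Set.add PySem.Set.empty c = [c] := by
    simp [PySem.Set.add, PySem.Set.empty, PySem.Set.contains]
  rw [hadd, hks [c] (by simp), foldl_add_cons_seed ms c [] h2]
  rfl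

-- head of a dropWhile fails the predicate
lemma dropWhile_head_false {α : Type} (p : α → Bool) (l : List α) (d : α) (ds : List α)
    (h : l.dropWhile p = d :: ds) : p d = false := by
  induction l with
  | nil => simp at h
  | cons x xs ih =>
    rw [List.dropWhile_cons] at h
    split at h
    · exact ih h
    · cases h; simp_all

-- the central characterisation of A's merged result on a key-sorted list
lemma mergeRuns_eq (n : Nat) :
    ∀ (rest : List (List (String × String))) (h : List (String × String)),
      rest.length ≤ n →
      (h :: rest).Pairwise (fun a b => keyC a ≤ keyC b) →
      mergeRuns h rest =
        (PySem.Set.ofList ((h :: rest).map keyC)).map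
          (fun c => mergeGroup ((h :: rest).filter (fun d => keyC d == c))) := by
  induction n with
  | zero =>
    intro rest h hlen _
    have : rest = [] := List.eq_nil_of_length_eq_zero (Nat.le_zero.mp hlen)
    subst this
    simp [mergeRuns, mergeGroup, PySem.Set.ofList, PySem.Set.add, PySem.Set.empty,
      PySem.Set.contains]
  | succ n ih =>
    intro rest h hlen hpair
    have hh_le : ∀ y ∈ rest, keyC h ≤ keyC y := (List.pairwise_cons.mp hpair).1
    have hrest_pair : rest.Pairwise (fun a b => keyC a ≤ keyC b) := (List.pairwise_cons.mp hpair).2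
    set same := rest.takeWhile (fun t => keyC t == keyC h) with hsame
    have hsplit : rest = same ++ rest.dropWhile (fun t => keyC t == keyC h) :=
      (List.takeWhile_append_dropWhile).symm
    have hsameK : ∀ t ∈ same, keyC t = keyC h := by
      intro t ht
      rw [hsame] at ht
      have hb := List.mem_takeWhile_imp (p := fun t => keyC t == keyC h) ht
      exact eq_of_beq hb
    have hfiltSame : same.filter (fun d => keyC d == keyC h) = same :=
      List.filter_eq_self.mpr (fun t ht => by simp [hsameK t ht])
    cases hd : rest.dropWhile (fun t => keyC t == keyC h) with
    | nil =>
      rw [hd] at hsplit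
      simp only [List.append_nil] at hsplit
      -- the whole rest is one run of h's key
      have hrun := mergeRuns_run same h [] (fun t ht => hsameK t ht)
      rw [hsplit, ← List.append_nil same, hrun]
      have hkeys : (h :: same).map keyC = keyC h :: ((same.map keyC) ++ []) := by simp
      have hof : PySem.Set.ofList ((h :: same).map keyC) = [keyC h] := by
        rw [hkeys, ofList_run (same.map keyC) [] (keyC h)
          (by intro k hk; obtain ⟨t, ht, rfl⟩ := List.mem_map.mp hk; exact hsameK t ht)
          (by simp)]
        rfl
      rw [List.append_nil, hof]
      simp only [List.map_cons, List.map_nil, mergeRuns]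
      have : (h :: same).filter (fun d => keyC d == keyC h) = h :: same := by
        simp [List.filter_cons, hfiltSame]
      rw [this]
      rfl
    | cons d ds =>
      have hdmem : d ∈ rest := by rw [hsplit, hd]; simp
      have hd0 : (keyC d == keyC h) = false :=
        dropWhile_head_false (fun t => keyC t == keyC h) rest d ds hd
      have hdlt : keyC h < keyC d :=
        lt_of_le_of_ne (hh_le d hdmem) (fun he => by simp [he.symm] at hd0)
      have hdiff_pair : (d :: ds).Pairwise (fun a b => keyC a ≤ keyC b) :=
        hrest_pair.sublist (hd ▸ List.dropWhile_sublist _)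
      have hdsK : ∀ y ∈ d :: ds, keyC h < keyC y := by
        intro y hy
        rcases List.mem_cons.mp hy with rfl | hy
        · exact hdlt
        · exact lt_of_lt_of_le hdlt ((List.pairwise_cons.mp hdiff_pair).1 y hy)
      rw [hd] at hsplit
      -- consume the first run, then step once and use the induction hypothesis
      have hrun := mergeRuns_run same h (d :: ds) (fun t ht => hsameK t ht)
      rw [← hsplit] at hrun
      have hstep : mergeRuns (same.foldl mergeA h) (d :: ds) =
          (same.foldl mergeA h) :: mergeRuns d ds := by
        have : (keyC d == keyC (same.foldl mergeA h)) = false := by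
          rw [keyC_foldl_mergeA]; exact hd0
        simp [mergeRuns, this]
      have hlen' : ds.length ≤ n := by
        have := hlen
        rw [hsplit] at this
        simp only [List.length_append, List.length_cons] at this
        omega
      have hih := ih ds d hlen' hdiff_pair
      -- decompose the key set
      have hof : PySem.Set.ofList ((h :: rest).map keyC) =
          keyC h :: PySem.Set.ofList ((d :: ds).map keyC) := by
        rw [hsplit]
        have : (h :: (same ++ d :: ds)).map keyC =
            keyC h :: ((same.map keyC) ++ (d :: ds).map keyC) := by simp
        rw [this, ofList_run (same.map keyC) ((d :: ds).map keyC) (keyC h)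
          (by intro k hk; obtain ⟨t, ht, rfl⟩ := List.mem_map.mp hk; exact hsameK t ht)
          (by intro hk; obtain ⟨t, ht, hteq⟩ := List.mem_map.mp hk
              exact absurd hteq ((hdsK t ht).ne'))]
    
      -- the head group filter
      have hfiltHead : (h :: rest).filter (fun d' => keyC d' == keyC h) = h :: same := by
        rw [hsplit]
        have hnil : (d :: ds).filter (fun d' => keyC d' == keyC h) = [] :=
          List.filter_eq_nil_iff.mpr (fun t ht => by
            have : keyC t ≠ keyC h := (hdsK t ht).ne'
            simp [this])
        simp [List.filter_cons, List.filter_append, hfiltSame, hnil]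
      -- other groups ignore h and the first run
      have hfiltTail : ∀ c ∈ PySem.Set.ofList ((d :: ds).map keyC),
          (h :: rest).filter (fun d' => keyC d' == c) =
            (d :: ds).filter (fun d' => keyC d' == c) := by
        intro c hc
        obtain ⟨t, ht, rfl⟩ := List.mem_map.mp ((PySem.Set.mem_ofList _ _).mp hc)
        have hhc : (keyC h == keyC t) = false := by
          have : keyC h ≠ keyC t := (hdsK t ht).ne
          simp [this]
        have hsc : same.filter (fun d' => keyC d' == keyC t) = [] :=
          List.filter_eq_nil_iff.mpr (fun u hu => by
            rw [hsameK u hu]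
            have : keyC h ≠ keyC t := (hdsK t ht).ne
            simp [this])
        rw [hsplit]
        simp [List.filter_cons, List.filter_append, hhc, hsc]
      rw [hrun, hstep, hih, hof]
      simp only [List.map_cons]
      congr 1
      · rw [hfiltHead]; rfl
      · exact (List.map_congr_left (fun c hc => by rw [hfiltTail c hc])).symm

-- stability of the sort: filtering one key class commutes with sorting
lemma filter_insertBy (x : List (String × String)) (ys : List (List (String × String)))
    (c : String) (hp : ys.Pairwise (fun a b => keyC a ≤ keyC b)) :
    (PySem.List.insertBy (fun a b => decide (keyC a < keyC b)) x ys).filter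
        (fun d => keyC d == c) =
      ys.filter (fun d => keyC d == c) ++ (if keyC x == c then [x] else []) := by
  induction ys with
  | nil =>
    rw [PySem.List.insertBy.eq_1]
    simp [List.filter_cons]
  | cons y ys ih =>
    have hyle : ∀ t ∈ ys, keyC y ≤ keyC t := (List.pairwise_cons.mp hp).1
    have htail : ys.Pairwise (fun a b => keyC a ≤ keyC b) := (List.pairwise_cons.mp hp).2
    rw [PySem.List.insertBy.eq_2]
    by_cases hlt : decide (keyC x < keyC y) = true
    · rw [if_pos hlt]
      have hxy : keyC x < keyC y := of_decide_eq_true hlt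
      by_cases hqx : (keyC x == c) = true
      · have hxc : keyC x = c := eq_of_beq hqx
        have hnil : (y :: ys).filter (fun d => keyC d == c) = [] := by
          apply List.filter_eq_nil_iff.mpr
          intro t ht
          have hyt : keyC y ≤ keyC t := by
            rcases List.mem_cons.mp ht with rfl | ht
            · exact le_refl _
            · exact hyle t ht
          have : keyC t ≠ c := by rw [← hxc]; exact (lt_of_lt_of_le hxy hyt).ne'
          simp [this]
        rw [List.filter_cons_of_pos (by simpa using hqx), hnil, hqx]
        rfl
      · rw [List.filter_cons_of_neg (by simpa using hqx)]
        simp [hqx]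
    · rw [if_neg hlt, List.filter_cons, List.filter_cons, ih htail]
      by_cases hqy : (keyC y == c) = true
      · rw [if_pos hqy, if_pos hqy, List.cons_append]
      · rw [if_neg hqy, if_neg hqy]
lemma filter_sorted (l : List (List (String × String))) (c : String) :
    (PySem.List.sorted l keyC false).filter (fun d => keyC d == c) =
      l.filter (fun d => keyC d == c) := by
  induction l using List.reverseRecOn with
  | nil => rfl
  | append_singleton l x ih =>
    have h1 : PySem.List.sorted (l ++ [x]) keyC false =
        PySem.List.insertBy (fun a b => decide (keyC a < keyC b)) x
          (PySem.List.sorted l keyC false) := by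
      rw [PySem.List.sorted_eq_foldl_insertBy, PySem.List.sorted_eq_foldl_insertBy,
        List.foldl_append]
      rfl
    rw [h1, filter_insertBy x _ c (PySem.List.sorted_pairwise l keyC), ih,
      List.filter_append]
    simp [List.filter_cons]

-- B in closed form
lemma keys_buildGroups (l : List (List (String × String))) :
    (buildGroups l).keys = PySem.Set.ofList (l.map keyC) := by
  unfold buildGroups
  rw [PySem.Dict.keys_foldl_modify_key l keyC [] (fun g t v => v ++ [t]) PySem.Dict.empty,
    PySem.Dict.keys_empty, PySem.Set.update_eq_append_filter]
  simp [PySem.Set.contains]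

lemma getD_buildGroups (l : List (List (String × String))) (c : String) :
    (buildGroups l).getD c [] = l.filter (fun d => keyC d == c) := by
  unfold buildGroups
  have hmap : l.foldl (fun g t => g.modify (keyC t) [] (fun v => v ++ [t])) PySem.Dict.empty
      = (l.map (fun t => (keyC t, t))).foldl
          (fun g p => g.modify p.1 [] (fun v => v ++ [p.2])) PySem.Dict.empty := by
    rw [List.foldl_map]
  rw [hmap, PySem.Dict.getD_foldl_modify_append, PySem.Dict.getD_empty]
  simp [List.filter_map, Function.comp_def, List.map_map]

lemma alt_eq_map (l : List (List (String × String))) :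
    sort_by_key_alt l =
      (PySem.List.sorted (PySem.Set.ofList (l.map keyC)) (fun x => x) false).map
        (fun c => mergeGroup (l.filter (fun d => keyC d == c))) := by
  show (PySem.List.sorted (buildGroups l).keys (fun x => x) false).foldl
      (fun res c =>
        match (buildGroups l).getD c [] with
        | [] => res
        | h :: rest => res ++ [rest.foldl mergeB h]) [] = _
  rw [keys_buildGroups]
  have hcong : ∀ (res : List (List (String × String))),
      ∀ c ∈ PySem.List.sorted (PySem.Set.ofList (l.map keyC)) (fun x => x) false,
      (match (buildGroups l).getD c [] with
       | [] => res
       | h :: rest => res ++ [rest.foldl mergeB h]) =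
      res ++ [mergeGroup (l.filter (fun d => keyC d == c))] := by
    intro res c hc
    have hcmem : c ∈ l.map keyC :=
      (PySem.Set.mem_ofList _ _).mp ((PySem.List.mem_sorted _ _ _ c).mp hc)
    obtain ⟨t, ht, htc⟩ := List.mem_map.mp hcmem
    have htf : t ∈ l.filter (fun d => keyC d == c) :=
      List.mem_filter.mpr ⟨ht, by simp [htc]⟩
    rw [getD_buildGroups]
    rcases hfe : l.filter (fun d => keyC d == c) with _ | ⟨fh, ftl⟩
    · rw [hfe] at htf
      cases htf
    · simp [mergeGroup, mergeB_eq_mergeA]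
  rw [PySem.List.foldl_congr_mem _ _
    (fun res c => res ++ [mergeGroup (l.filter (fun d => keyC d == c))]) [] hcong]
  rw [PySem.List.foldl_append_singleton_eq_map]
  rfl

-- ===== VERDICT (by name: the statement is the Claim_ definition above) =====
theorem sort_by_key_spec : Claim_equal_sort_by_key := by
  intro l _ hpre
  unfold Spec_sort_by_key
  rw [alt_eq_map]
  unfold sort_by_key
  rcases hE : PySem.List.sorted l keyC false with _ | ⟨h, rest⟩
  · exact absurd ((PySem.List.sorted_eq_nil_iff l keyC false).mp hE) hpre.1
  · have hp : (h :: rest).Pairwise (fun a b => keyC a ≤ keyC b) := by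
      rw [← hE]; exact PySem.List.sorted_pairwise l keyC
    have hperm : (h :: rest).Perm l := hE ▸ PySem.List.sorted_perm l keyC false
    have hA : rest.foldl stepA [h] = mergeRuns h rest := by
      simpa using foldl_stepA_eq rest [] h
    show rest.foldl stepA [h] = _
    rw [hA, mergeRuns_eq rest.length rest h le_rfl hp]
    have hks : PySem.List.sorted (PySem.Set.ofList (l.map keyC)) (fun x => x) false =
        PySem.Set.ofList ((h :: rest).map keyC) := by
      apply PySem.List.sorted_eq_of_perm_of_pairwise_lt
      · apply (List.perm_ext_iff_of_nodup (PySem.Set.nodup_ofList _)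
          (PySem.Set.nodup_ofList _)).mpr
        intro a
        rw [PySem.Set.mem_ofList, PySem.Set.mem_ofList]
        exact (hperm.map keyC).mem_iff
      · exact ofList_pairwise_lt _ (List.pairwise_map.mpr hp)
    rw [hks]
    apply List.map_congr_left
    intro c hc
    rw [← filter_sorted l c, hE]
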